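-- pv_equiv track=rewrite | github.com/allburov/codeforces | yandex-algorithm-training/dz6-b-e.py | coverAll
-- ===== SOURCE A (Python) =====
-- import bisect
--
-- def coverAll(k, l, nums) -> bool:
--     n = len(nums)
--     start = 0
--     left = k
--
--     while left > 0 and start <= n - 1:
--         start = bisect.bisect_right(nums, nums[start] + l, lo=start)
--         left -= 1
--     return start > n - 1
-- ===== SOURCE B (Python) =====
-- def coverAll(k, l, nums) -> bool:
--     if not nums:
--         return True
--     n = len(nums)
--     i = 0
--     jumps = 0
--     while i < n:
--         threshold = nums[i] + l
--         j = i
--         while j < n and nums[j] <= threshold: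
--             j += 1
--         if j == i:
--             return False
--         i = j
--         jumps += 1
--     return jumps <= k
-- ===== Notes on version B (the rewrite author's own statement) =====
-- stated objective: alternative
-- what changed: Replaces the k-bounded loop of bisect binary searches by a single two-pointer linear sweep that counts the (greedy, minimal) number of jumps, bails out when a jump makes no progress, and finally compares the jump count with k.
-- outside the precondition, e.g. on coverAll(1, 0, [1, 9, 1, 1]): A returns True, B returns False
import Mathlib
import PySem

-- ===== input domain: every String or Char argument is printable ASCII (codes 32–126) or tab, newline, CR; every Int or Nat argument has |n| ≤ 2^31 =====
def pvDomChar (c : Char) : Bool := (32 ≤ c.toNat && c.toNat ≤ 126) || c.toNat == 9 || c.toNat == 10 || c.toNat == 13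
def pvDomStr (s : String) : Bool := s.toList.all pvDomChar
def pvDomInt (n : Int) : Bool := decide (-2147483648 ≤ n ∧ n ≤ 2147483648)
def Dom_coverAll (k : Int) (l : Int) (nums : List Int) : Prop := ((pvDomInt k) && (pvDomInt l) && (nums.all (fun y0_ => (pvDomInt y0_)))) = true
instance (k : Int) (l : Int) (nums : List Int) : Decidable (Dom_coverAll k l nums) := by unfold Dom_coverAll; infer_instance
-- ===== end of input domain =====

-- B replaces A's k-bounded loop of bisect binary searches by a single two-pointer
-- linear sweep counting greedy jumps (objective: alternative; proved equal on sorted input).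

-- ===== PORT A =====
-- bisect.bisect_right(nums, x, lo=lo): binary search, transliterated step for step.
def bisectGo (nums : List Int) (x : Int) (lo hi : Nat) : Nat :=
  if lo < hi then
    -- mid = (lo + hi) // 2
    if x < nums.getD ((lo + hi) / 2) 0 then bisectGo nums x lo ((lo + hi) / 2)
    else bisectGo nums x ((lo + hi) / 2 + 1) hi
  else lo
termination_by hi - lo
decreasing_by all_goals omega

def bisectRight (nums : List Int) (x : Int) (lo : Nat) : Nat :=
  bisectGo nums x lo nums.length

-- the while loop of A: state (left, start); returns the final start
def coverAllLoop (nums : List Int) (l : Int) (left : Int) (start : Nat) : Nat :=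
  if _h : 0 < left ∧ (start : Int) ≤ (nums.length : Int) - 1 then
    coverAllLoop nums l (left - 1) (bisectRight nums (nums.getD start 0 + l) start)
  else start
termination_by left.toNat
decreasing_by omega

def coverAll (k : Int) (l : Int) (nums : List Int) : Bool :=
  decide (((coverAllLoop nums l k 0 : Nat) : Int) > (nums.length : Int) - 1)

-- ===== PORT B =====
-- inner while: advance j while j < n and nums[j] <= threshold
def scanJ (nums : List Int) (threshold : Int) (n : Nat) (j : Nat) : Nat :=
  if j < n ∧ nums.getD j 0 ≤ threshold then scanJ nums threshold n (j + 1) else j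
termination_by n - j
decreasing_by omega

theorem scanJ_le_aux (nums : List Int) (t : Int) (n j : Nat) : j ≤ scanJ nums t n j := by
  unfold scanJ
  split
  · exact le_trans (Nat.le_succ j) (scanJ_le_aux nums t n (j + 1))
  · exact le_refl j
termination_by n - j
decreasing_by omega

-- outer while: state (i, jumps)
def altLoop (k : Int) (nums : List Int) (l : Int) (n : Nat) (i : Nat) (jumps : Int) : Bool :=
  if h : i < n then
    let j := scanJ nums (nums.getD i 0 + l) n i
    if hj : j = i then false
    else altLoop k nums l n j (jumps + 1)
  else decide (jumps ≤ k)
termination_by n - i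
decreasing_by
  have := scanJ_le_aux nums (nums.getD i 0 + l) n i
  omega

def coverAll_alt (k : Int) (l : Int) (nums : List Int) : Bool :=
  if nums = [] then true
  else altLoop k nums l nums.length 0 0

-- ===== PRECONDITION & SPEC =====
-- Pre_ excludes unsorted lists: there A still returns a value, but that value is an
-- artefact of calling bisect_right on input violating its sorted-input contract, so
-- neither A's binary-search answer nor B's linear-scan answer is the specified one.
def Pre_coverAll (k : Int) (l : Int) (nums : List Int) : Prop :=
  List.Pairwise (· ≤ ·) nums
instance (k : Int) (l : Int) (nums : List Int) : Decidable (Pre_coverAll k l nums) := by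
  unfold Pre_coverAll; infer_instance

def pvWitness_coverAll : Int × Int × List Int := (2, 3, [1, 2, 5, 9])

def Spec_coverAll (k : Int) (l : Int) (nums : List Int) (out : Bool) : Prop := out = coverAll_alt k l nums
instance (k : Int) (l : Int) (nums : List Int) (out : Bool) : Decidable (Spec_coverAll k l nums out) := by unfold Spec_coverAll; infer_instance

-- ===== CLAIM (what is proved, stated in full; the proofs are below) =====
def Claim_equal_coverAll : Prop := ∀ (k : Int) (l : Int) (nums : List Int), Dom_coverAll k l nums → Pre_coverAll k l nums → Spec_coverAll k l nums (coverAll k l nums)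

-- ===== LEMMAS AND PROOFS =====

-- sorted access lemma
theorem sorted_getD (nums : List Int) (hs : List.Pairwise (· ≤ ·) nums)
    (i j : Nat) (hij : i ≤ j) (hj : j < nums.length) :
    nums.getD i 0 ≤ nums.getD j 0 := by
  rcases Nat.eq_or_lt_of_le hij with rfl | hlt
  · exact le_refl _
  · have hi : i < nums.length := lt_trans hlt hj
    rw [List.getD_eq_getElem _ _ hi, List.getD_eq_getElem _ _ hj]
    exact List.Pairwise.rel_get_of_lt hs hlt

-- characterisation predicate of "first index ≥ lo whose element exceeds x" (up to n)
def Char_ (nums : List Int) (x : Int) (lo n p : Nat) : Prop :=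
  lo ≤ p ∧ p ≤ n ∧ (∀ i, lo ≤ i → i < p → nums.getD i 0 ≤ x) ∧ (p < n → x < nums.getD p 0)

theorem scanJ_char (nums : List Int) (x : Int) (n lo : Nat) (hlo : lo ≤ n) :
    Char_ nums x lo n (scanJ nums x n lo) := by
  unfold scanJ
  split
  · rename_i h
    have ih := scanJ_char nums x n (lo + 1) (by omega)
    obtain ⟨h1, h2, h3, h4⟩ := ih
    refine ⟨by omega, h2, ?_, h4⟩
    intro i hi1 hi2
    rcases Nat.eq_or_lt_of_le hi1 with rfl | hlt
    · exact h.2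
    · exact h3 i hlt hi2
  · rename_i h
    refine ⟨le_refl _, hlo, by omega, ?_⟩
    intro hn
    by_contra hx
    exact h ⟨hn, by omega⟩
termination_by n - lo
decreasing_by omega

theorem bisectGo_char (nums : List Int) (hs : List.Pairwise (· ≤ ·) nums) (x : Int)
    (lo hi : Nat) (hlohi : lo ≤ hi) (hhi : hi ≤ nums.length) :
    lo ≤ bisectGo nums x lo hi ∧ bisectGo nums x lo hi ≤ hi ∧
    (∀ i, lo ≤ i → i < bisectGo nums x lo hi → nums.getD i 0 ≤ x) ∧
    (∀ i, bisectGo nums x lo hi ≤ i → i < hi → x < nums.getD i 0) := by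
  unfold bisectGo
  split
  · rename_i h
    have hmid1 : lo ≤ (lo + hi) / 2 := by omega
    have hmid2 : (lo + hi) / 2 < hi := by omega
    split
    · rename_i hx
      have ih := bisectGo_char nums hs x lo ((lo + hi) / 2) hmid1 (by omega)
      obtain ⟨h1, h2, h3, h4⟩ := ih
      refine ⟨h1, by omega, h3, ?_⟩
      intro i hi1 hi2
      by_cases hc : i < (lo + hi) / 2
      · exact h4 i hi1 hc
      · calc x < nums.getD ((lo + hi) / 2) 0 := hx
          _ ≤ nums.getD i 0 := sorted_getD nums hs _ i (by omega) (by omega)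
    · rename_i hx
      have ih := bisectGo_char nums hs x ((lo + hi) / 2 + 1) hi (by omega) hhi
      obtain ⟨h1, h2, h3, h4⟩ := ih
      refine ⟨by omega, h2, ?_, h4⟩
      intro i hi1 hi2
      by_cases hc : (lo + hi) / 2 + 1 ≤ i
      · exact h3 i hc hi2
      · calc nums.getD i 0 ≤ nums.getD ((lo + hi) / 2) 0 :=
              sorted_getD nums hs i _ (by omega) (by omega)
          _ ≤ x := by omega
  · rename_i h
    exact ⟨le_refl _, by omega, by omega, by omega⟩
termination_by hi - lo
decreasing_by all_goals omega

theorem char_unique (nums : List Int) (x : Int) (lo n p q : Nat)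
    (hp : Char_ nums x lo n p) (hq : Char_ nums x lo n q) : p = q := by
  obtain ⟨hp1, hp2, hp3, hp4⟩ := hp
  obtain ⟨hq1, hq2, hq3, hq4⟩ := hq
  by_contra hne
  rcases Nat.lt_or_ge p q with hlt | hge
  · have h1 := hq3 p hp1 hlt
    have h2 := hp4 (by omega)
    omega
  · have hlt : q < p := by omega
    have h1 := hp3 q hq1 hlt
    have h2 := hq4 (by omega)
    omega

theorem bisect_eq_scan (nums : List Int) (hs : List.Pairwise (· ≤ ·) nums) (x : Int)
    (lo : Nat) (hlo : lo ≤ nums.length) :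
    bisectRight nums x lo = scanJ nums x nums.length lo := by
  have hb := bisectGo_char nums hs x lo nums.length hlo (le_refl _)
  obtain ⟨h1, h2, h3, h4⟩ := hb
  have hbc : Char_ nums x lo nums.length (bisectRight nums x lo) := by
    refine ⟨h1, h2, h3, ?_⟩
    intro hn
    exact h4 _ (le_refl _) hn
  exact char_unique nums x lo nums.length _ _ hbc (scanJ_char nums x nums.length lo hlo)

theorem scanJ_le (nums : List Int) (t : Int) (n lo : Nat) (hlo : lo ≤ n) :
    scanJ nums t n lo ≤ n :=
  (scanJ_char nums t n lo hlo).2.1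

-- A's loop is stuck when the jump makes no progress
theorem coverAllLoop_stuck (nums : List Int) (l : Int) (start : Nat)
    (hfix : bisectRight nums (nums.getD start 0 + l) start = start) :
    ∀ (c : Int), coverAllLoop nums l c start = start := by
  intro c
  unfold coverAllLoop
  split
  · rw [hfix]
    exact coverAllLoop_stuck nums l start hfix (c - 1)
  · rfl
termination_by c => c.toNat
decreasing_by rename_i h; omega

theorem coverAllLoop_end (nums : List Int) (l : Int) (c : Int) (start : Nat)
    (hst : nums.length ≤ start) : coverAllLoop nums l c start = start := by
  unfold coverAllLoop
  split
  · rename_i h; omega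
  · rfl

theorem coverAllLoop_nonpos (nums : List Int) (l : Int) (c : Int) (start : Nat)
    (hc : c ≤ 0) : coverAllLoop nums l c start = start := by
  unfold coverAllLoop
  split
  · rename_i h; omega
  · rfl

-- main correspondence between the two loops, for start strictly inside the array
theorem main_loop (k l : Int) (nums : List Int) (hs : List.Pairwise (· ≤ ·) nums)
    (start : Nat) (hstart : start < nums.length) (c : Int) :
    decide (((coverAllLoop nums l c start : Nat) : Int) > (nums.length : Int) - 1)
      = altLoop k nums l nums.length start (k - c) := by
  have hsn : start ≤ nums.length := le_of_lt hstart
  have hje := bisect_eq_scan nums hs (nums.getD start 0 + l) start hsn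
  set j := scanJ nums (nums.getD start 0 + l) nums.length start with hjdef
  have hjle : j ≤ nums.length := scanJ_le nums _ _ start hsn
  have hjge : start ≤ j := scanJ_le_aux nums _ _ start
  by_cases hfix : j = start
  · -- no progress: both sides give false
    have hA : ∀ c', coverAllLoop nums l c' start = start :=
      coverAllLoop_stuck nums l start (by rw [hje, hfix])
    rw [hA c]
    conv_rhs => rw [altLoop]
    rw [dif_pos hstart]
    simp only [← hjdef]
    rw [dif_pos hfix]
    simp only [decide_eq_false_iff_not]
    omega
  · -- progress: j > start
    have hjgt : start < j := by omega
    conv_rhs => rw [altLoop]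
    rw [dif_pos hstart]
    simp only [← hjdef]
    rw [dif_neg hfix]
    by_cases hjn : j = nums.length
    · -- jump reaches the end: A succeeds iff it still had fuel
      conv_rhs => rw [altLoop]
      rw [dif_neg (by omega : ¬ j < nums.length)]
      by_cases hc : 0 < c
      · rw [coverAllLoop, dif_pos ⟨hc, by omega⟩, hje,
            coverAllLoop_end nums l (c - 1) j (by omega)]
        simp only [decide_eq_decide]
        omega
      · rw [coverAllLoop_nonpos nums l c start (by omega)]
        simp only [decide_eq_decide]
        omega
    · -- jump stays inside: apply IH at j with fuel c - 1
      have ih := main_loop k l nums hs j (by omega) (c - 1)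
      have hkc : k - c + 1 = k - (c - 1) := by ring
      rw [hkc, ← ih]
      by_cases hc : 0 < c
      · rw [coverAllLoop, dif_pos ⟨hc, by omega⟩, hje]
      · rw [coverAllLoop_nonpos nums l c start (by omega),
            coverAllLoop_nonpos nums l (c - 1) j (by omega)]
        simp
        omega
termination_by nums.length - start
decreasing_by omega

-- ===== VERDICT (by name: the statement is the Claim_ definition above) =====
theorem coverAll_spec : Claim_equal_coverAll := by
  intro k l nums _ hpre
  unfold Spec_coverAll coverAll coverAll_alt
  by_cases hnil : nums = []
  · subst hnil
    rw [if_pos rfl, coverAllLoop_end [] l k 0 (by simp)]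
    decide
  · rw [if_neg hnil]
    have hn : 0 < nums.length := List.length_pos_iff.mpr hnil
    have := main_loop k l nums hpre 0 hn k
    simpa using this
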